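-- pv_equiv track=rewrite | github.com/dleonardo-gomez/AnalisisNumerico | Hermite.py | agregarHermite
-- ===== SOURCE A (Python) =====
-- def agregarHermite(x,xPun):
--
--     if x == 0:
--         string = ""
--         return string
--     elif x % 2 == 1 :
--         string = "*(x-"+str(xPun[((x+1)//2)-1])+")"
--         return string + agregarHermite(x-1,xPun)
--     else :
--         string = "*((x-"+str(xPun[((x+1)//2)-1])+")**2)"
--         return string + agregarHermite(x-2,xPun)
-- ===== SOURCE B (Python) =====
-- def agregarHermite(x, xPun):
--     parts = []
--     while x != 0:
--         idx = ((x + 1) // 2) - 1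
--         if x % 2 == 1:
--             parts.append("*(x-" + str(xPun[idx]) + ")")
--             x -= 1
--         else:
--             parts.append("*((x-" + str(xPun[idx]) + ")**2)")
--             x -= 2
--     return "".join(parts)
-- ===== Notes on version B (the rewrite author's own statement) =====
-- stated objective: simpler
-- what changed: Replaced the recursive string concatenation with an iterative while-loop that collects the factor strings in a list and joins them once at the end.
import Mathlib
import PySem

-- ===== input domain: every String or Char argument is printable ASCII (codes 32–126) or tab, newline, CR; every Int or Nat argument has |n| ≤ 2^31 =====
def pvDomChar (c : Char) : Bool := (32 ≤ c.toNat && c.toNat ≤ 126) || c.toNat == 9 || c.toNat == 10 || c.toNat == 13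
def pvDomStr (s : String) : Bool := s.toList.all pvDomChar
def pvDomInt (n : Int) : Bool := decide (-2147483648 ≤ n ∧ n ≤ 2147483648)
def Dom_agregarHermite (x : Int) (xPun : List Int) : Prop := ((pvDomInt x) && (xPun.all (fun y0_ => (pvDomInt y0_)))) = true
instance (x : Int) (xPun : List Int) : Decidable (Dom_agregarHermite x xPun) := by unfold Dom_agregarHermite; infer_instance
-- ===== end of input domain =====

-- B replaces A's recursion (with repeated string concatenation) by an iterative loop
-- collecting the factor strings in a list joined once at the end; objective: simpler.

-- ===== PORT A =====
-- A's recursion on an Int does not terminate structurally (Python diverges for x < 0),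
-- so the port carries a fuel counter; fuel = x.toNat + 1 is enough on every input where
-- the Python returns (x ≥ 0), and those are exactly the inputs Pre_ admits.
def agregarHermiteFuel (fuel : Nat) (x : Int) (xPun : List Int) : String :=
  match fuel with
  | 0 => ""
  | fuel + 1 =>
    if x = 0 then ""
    else if PySem.Int.mod x 2 = 1 then
      match PySem.List.pyGet? xPun (PySem.Int.floordiv (x + 1) 2 - 1) with
      | some v => ("*(x-" ++ PySem.Int.toStr v ++ ")") ++ agregarHermiteFuel fuel (x - 1) xPun
      | none => ""   -- IndexError in Python; excluded by Pre_
    else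
      match PySem.List.pyGet? xPun (PySem.Int.floordiv (x + 1) 2 - 1) with
      | some v => ("*((x-" ++ PySem.Int.toStr v ++ ")**2)") ++ agregarHermiteFuel fuel (x - 2) xPun
      | none => ""   -- IndexError in Python; excluded by Pre_

def agregarHermite (x : Int) (xPun : List Int) : String :=
  agregarHermiteFuel (x.toNat + 1) x xPun

-- ===== PORT B =====
-- B's while-loop, same fuel scheme; `parts` is the Python list being appended to.
def agregarHermiteLoop (fuel : Nat) (x : Int) (xPun : List Int) (parts : List String) : List String :=
  match fuel with
  | 0 => parts
  | fuel + 1 =>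
    if x = 0 then parts
    else
      match PySem.List.pyGet? xPun (PySem.Int.floordiv (x + 1) 2 - 1) with
      | none => parts   -- IndexError in Python; excluded by Pre_
      | some v =>
        if PySem.Int.mod x 2 = 1 then
          agregarHermiteLoop fuel (x - 1) xPun (parts ++ ["*(x-" ++ PySem.Int.toStr v ++ ")"])
        else
          agregarHermiteLoop fuel (x - 2) xPun (parts ++ ["*((x-" ++ PySem.Int.toStr v ++ ")**2)"])

def agregarHermite_alt (x : Int) (xPun : List Int) : String :=
  String.join (agregarHermiteLoop (x.toNat + 1) x xPun [])

-- ===== PRECONDITION & SPEC =====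
-- Pre_ admits exactly the inputs on which Python A returns: x < 0 makes A recurse forever
-- (RecursionError), and an xPun shorter than (x+1)//2 makes the very first lookup raise IndexError.
def Pre_agregarHermite (x : Int) (xPun : List Int) : Prop :=
  0 ≤ x ∧ PySem.Int.floordiv (x + 1) 2 ≤ (xPun.length : Int)
instance (x : Int) (xPun : List Int) : Decidable (Pre_agregarHermite x xPun) := by
  unfold Pre_agregarHermite; infer_instance

def pvWitness_agregarHermite : Int × List Int := (5, [1, 2, 3])

def Spec_agregarHermite (x : Int) (xPun : List Int) (out : String) : Prop := out = agregarHermite_alt x xPun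
instance (x : Int) (xPun : List Int) (out : String) : Decidable (Spec_agregarHermite x xPun out) := by unfold Spec_agregarHermite; infer_instance

-- ===== CLAIM (what is proved, stated in full; the proofs are below) =====
def Claim_equal_agregarHermite : Prop := ∀ (x : Int) (xPun : List Int), Dom_agregarHermite x xPun → Pre_agregarHermite x xPun → Spec_agregarHermite x xPun (agregarHermite x xPun)

-- ===== LEMMAS AND PROOFS =====

theorem join_append_singleton (parts : List String) (s : String) :
    String.join (parts ++ [s]) = String.join parts ++ s := by
  induction parts with
  | nil => simp [String.join]
  | cons h t ih => simp [String.join]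

theorem loop_eq_fuel (fuel : Nat) : ∀ (x : Int) (xPun : List Int) (parts : List String),
    String.join (agregarHermiteLoop fuel x xPun parts) =
      String.join parts ++ agregarHermiteFuel fuel x xPun := by
  induction fuel with
  | zero => intro x xPun parts; simp [agregarHermiteLoop, agregarHermiteFuel]
  | succ n ih =>
    intro x xPun parts
    simp only [agregarHermiteLoop, agregarHermiteFuel]
    by_cases hx : x = 0
    · simp [hx]
    · simp only [if_neg hx]
      rcases hget : PySem.List.pyGet? xPun (PySem.Int.floordiv (x + 1) 2 - 1) with _ | v
      · by_cases hm : x % 2 = 1 <;> simp [hm]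
      · by_cases hm : x % 2 = 1 <;>
          simp [hm, ih, join_append_singleton, String.append_assoc]

-- ===== VERDICT (by name: the statement is the Claim_ definition above) =====
theorem agregarHermite_spec : Claim_equal_agregarHermite := by
  intro x xPun _ _
  unfold Spec_agregarHermite agregarHermite agregarHermite_alt
  rw [loop_eq_fuel]
  simp [String.join]
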